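-- pv_equiv track=rewrite | github.com/drwiner/duel_cinematography_machine_learning | SceneDataStructs.py | figure_split_machine
-- ===== SOURCE A (Python) =====
-- def figure_split_machine(_str):
-- 	"""
-- 	:param _str: a figureobjs(shotstart) string
-- 	:return: a nested list where each primitive list is of the form ['type', 'ent_name', 'spatial position']
-- 	"""
--
-- 	ents = []
-- 	if _str is None or _str == 'None' or _str == 'none':
-- 		return ''
-- 	str_list = _str.split(',')
-- 	for i in str_list:
-- 		if i == '':
-- 			continue
-- 		z = i.split('(')
-- 		new_ent = []
-- 		for k in z:
-- 			if k == '':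
-- 				continue
-- 			m = k.split(')')
-- 			for q in m:
-- 				if q == '':
-- 					continue
-- 				new_ent.append(q)
-- 		ents.append(new_ent)
-- 	return ents
-- ===== SOURCE B (Python) =====
-- def figure_split_machine(_str):
-- 	"""Single-pass character tokenizer over _str (same result as the nested-split version)."""
-- 	if _str is None or _str == 'None' or _str == 'none':
-- 		return ''
-- 	ents = []
-- 	group = []
-- 	tok = ''
-- 	seen = False
-- 	for ch in _str:
-- 		if ch == ',':
-- 			if tok:
-- 				group.append(tok)
-- 			if seen:
-- 				ents.append(group)
-- 			group = []
-- 			tok = ''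
-- 			seen = False
-- 		elif ch == '(' or ch == ')':
-- 			if tok:
-- 				group.append(tok)
-- 			tok = ''
-- 			seen = True
-- 		else:
-- 			tok += ch
-- 			seen = True
-- 	if tok:
-- 		group.append(tok)
-- 	if seen:
-- 		ents.append(group)
-- 	return ents
-- ===== Notes on version B (the rewrite author's own statement) =====
-- stated objective: alternative
-- what changed: Replaced the three levels of str.split plus nested filtering loops by a single left-to-right character tokenizer that maintains a current token, a current group and a group-seen flag, flushing on parenthesis and comma characters.
-- outside the precondition, e.g. on figure_split_machine(None): A returns '', B returns ''; on figure_split_machine('None'): A returns '', B returns ''; on figure_split_machine('none'): A returns '', B returns ''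
import Mathlib
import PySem

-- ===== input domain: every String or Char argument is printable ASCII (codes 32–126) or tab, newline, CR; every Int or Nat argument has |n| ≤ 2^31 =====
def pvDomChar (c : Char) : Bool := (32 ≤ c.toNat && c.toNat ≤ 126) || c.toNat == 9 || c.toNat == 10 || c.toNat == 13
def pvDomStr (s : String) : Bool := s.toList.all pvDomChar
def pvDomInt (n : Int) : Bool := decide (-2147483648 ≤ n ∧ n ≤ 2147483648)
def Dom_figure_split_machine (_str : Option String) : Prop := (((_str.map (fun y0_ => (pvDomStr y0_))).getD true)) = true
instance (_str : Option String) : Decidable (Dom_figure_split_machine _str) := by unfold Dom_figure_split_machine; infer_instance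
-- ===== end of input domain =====

-- B replaces A's three levels of str.split with nested filter loops by one single-pass
-- character tokenizer (same O(n) cost, different decomposition).


-- ===== PORT A =====
-- Strings are handled as their character lists (PySem.Chars.splitOn = str.split for a
-- nonempty separator); on the excluded None/'None'/'none' inputs (where Python returns an
-- empty string, not a list) the port returns [].
def figure_split_machine (_str : Option String) : List (List String) :=
  match _str with
  | none => []
  | some s =>
    if s = "None" ∨ s = "none" then []
    else
      (PySem.Chars.splitOn s.toList [',']).foldl (fun ents i =>
        if i = [] then ents
        else
          let z := PySem.Chars.splitOn i ['(']
          let new_ent := z.foldl (fun ne k =>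
            if k = [] then ne
            else (PySem.Chars.splitOn k [')']).foldl
                   (fun ne q => if q = [] then ne else ne ++ [String.ofList q]) ne) []
          ents ++ [new_ent]) []

-- ===== PORT B =====
-- the single-pass tokenizer loop of Source B: state = (ents, group, tok, seen)
def figure_split_machine_altLoop : List Char → List (List String) → List String → List Char → Bool → List (List String)
  | [], ents, group, tok, seen =>
      let group := if tok = [] then group else group ++ [String.ofList tok]
      if seen then ents ++ [group] else ents
  | ch :: rest, ents, group, tok, seen =>
      if ch = ',' then
        let group := if tok = [] then group else group ++ [String.ofList tok]
        figure_split_machine_altLoop rest (if seen then ents ++ [group] else ents) [] [] false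
      else if ch = '(' ∨ ch = ')' then
        figure_split_machine_altLoop rest ents (if tok = [] then group else group ++ [String.ofList tok]) [] true
      else
        figure_split_machine_altLoop rest ents group (tok ++ [ch]) true

def figure_split_machine_alt (_str : Option String) : List (List String) :=
  match _str with
  | none => []
  | some s =>
    if s = "None" ∨ s = "none" then []
    else figure_split_machine_altLoop s.toList [] [] [] false

-- ===== PRECONDITION & SPEC =====
-- Pre_ excludes exactly None, 'None' and 'none', on which the Python A (and B) return an
-- empty string — not a value of the declared list[list[str]] type, hence unportable.
def Pre_figure_split_machine (_str : Option String) : Prop :=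
  _str ≠ none ∧ _str ≠ some "None" ∧ _str ≠ some "none"
instance (_str : Option String) : Decidable (Pre_figure_split_machine _str) := by
  unfold Pre_figure_split_machine; infer_instance
def pvWitness_figure_split_machine : Option String := some "person(bob)(left),sword(s1)"

def Spec_figure_split_machine (_str : Option String) (out : List (List String)) : Prop :=
  out = figure_split_machine_alt _str
instance (_str : Option String) (out : List (List String)) : Decidable (Spec_figure_split_machine _str out) := by
  unfold Spec_figure_split_machine; infer_instance

-- ===== CLAIM (what is proved, stated in full; the proofs are below) =====
def Claim_equal_figure_split_machine : Prop := ∀ (_str : Option String), Dom_figure_split_machine _str → Pre_figure_split_machine _str → Spec_figure_split_machine _str (figure_split_machine _str)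

-- ===== LEMMAS AND PROOFS =====

-- common spec: token list of a field (',' never occurs in a field), '(' and ')' are delimiters
def pvTokens : List Char → List Char → List (List Char)
  | tok, [] => if tok = [] then [] else [tok]
  | tok, c :: cs =>
      if c = '(' ∨ c = ')' then (if tok = [] then [] else [tok]) ++ pvTokens [] cs
      else pvTokens (tok ++ [c]) cs

def pvField (i : List Char) : List String := (pvTokens [] i).map String.ofList

-- (1) PySem's fuel-based split equals core List.splitOn for a single-character separator
lemma pv_go_spec (c : Char) : ∀ (fuel : Nat) (l cur : List Char) (acc : List (List Char)),
    l.length < fuel →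
    PySem.Chars.splitOn.go [c] fuel l cur acc
      = acc.reverse ++ (List.splitOn c l).modifyHead (cur.reverse ++ ·) := by
  intro fuel
  induction fuel with
  | zero => intro l cur acc h; omega
  | succ f ih =>
    intro l cur acc h
    cases l with
    | nil =>
      rw [PySem.Chars.splitOn.go]
      next => simp [List.splitOn]
      all_goals omega
    | cons x rest =>
      have hlen : rest.length < f := by simp at h; omega
      rw [PySem.Chars.splitOn.go]
      next =>
        by_cases hx : c = x
        · subst hx
          rw [if_pos (by simp [List.isPrefixOf]), show List.drop [c].length (c :: rest) = rest from rfl,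
              ih rest [] (cur.reverse :: acc) hlen]
          rcases hne : List.splitOn c rest with _ | ⟨hd, tl⟩
          · exact absurd hne (List.splitOnP_ne_nil _ _)
          · simp [List.splitOn, List.splitOnP_cons, List.splitOn] at hne ⊢
            simp [hne]
        · rw [if_neg (by simp [List.isPrefixOf]; exact hx),
              ih rest (x :: cur) acc hlen]
          rcases hne : List.splitOn c rest with _ | ⟨hd, tl⟩
          · exact absurd hne (List.splitOnP_ne_nil _ _)
          · simp only [List.splitOn, List.splitOnP_cons] at hne ⊢
            rw [hne, if_neg (by simp; exact fun h => hx h.symm)]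
            simp

lemma pv_splitOn_bridge (cs : List Char) (c : Char) :
    PySem.Chars.splitOn cs [c] = List.splitOn c cs := by
  show PySem.Chars.splitOn.go [c] (cs.length + 1) cs [] [] = _
  rw [pv_go_spec c (cs.length + 1) cs [] [] (by omega)]
  rcases h : List.splitOn c cs with _ | ⟨hd, tl⟩
  · exact absurd h (List.splitOnP_ne_nil _ _)
  · simp

-- (2) pieces of splitOnP contain no separator
lemma pv_splitOnP_pieces {α : Type} (p : α → Bool) :
    ∀ (l k : List α), k ∈ List.splitOnP p l → ∀ a ∈ k, p a = false := by
  intro l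
  induction l with
  | nil => intro k hk a ha; simp [List.splitOnP_nil] at hk; simp [hk] at ha
  | cons x xs ih =>
    intro k hk a ha
    rw [List.splitOnP_cons] at hk
    by_cases hx : p x
    · rw [if_pos hx] at hk
      rcases List.mem_cons.mp hk with hk2 | hk2
      · simp [hk2] at ha
      · exact ih k hk2 a ha
    · rw [if_neg hx] at hk
      rcases hne : List.splitOnP p xs with _ | ⟨hd, tl⟩
      · exact absurd hne (List.splitOnP_ne_nil _ _)
      · rw [hne] at hk
        simp only [List.modifyHead_cons, List.mem_cons] at hk
        rcases hk with hk2 | hk2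
        · subst hk2
          rcases List.mem_cons.mp ha with ha2 | ha2
          · simpa [ha2] using hx
          · exact ih hd (by simp [hne]) a ha2
        · exact ih k (by simp [hne, hk2]) a ha

-- (3) pvTokens across the '('-split of a field
lemma pv_tokens_P : ∀ (i tok : List Char) (h : List Char) (t : List (List Char)),
    List.splitOnP (· == '(') i = h :: t →
    pvTokens tok i = pvTokens tok h ++ t.flatMap (pvTokens []) := by
  intro i
  induction i with
  | nil =>
    intro tok h t hsplit
    rw [List.splitOnP_nil] at hsplit
    cases hsplit; simp
  | cons c cs ih =>
    intro tok h t hsplit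
    rw [List.splitOnP_cons] at hsplit
    rcases hrec : List.splitOnP (· == '(') cs with _ | ⟨h', t'⟩
    · exact absurd hrec (List.splitOnP_ne_nil _ _)
    by_cases hc : c = '('
    · subst hc
      rw [if_pos (by simp), hrec] at hsplit
      cases hsplit
      show pvTokens tok ('(' :: cs) = _
      rw [show pvTokens tok ('(' :: cs)
            = (if tok = [] then [] else [tok]) ++ pvTokens [] cs from by simp [pvTokens]]
      rw [ih [] _ _ hrec]
      simp [pvTokens]
    · rw [if_neg (by simp [hc]), hrec, List.modifyHead_cons] at hsplit
      cases hsplit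
      by_cases hc2 : c = ')'
      · subst hc2
        rw [show pvTokens tok (')' :: cs)
              = (if tok = [] then [] else [tok]) ++ pvTokens [] cs from by simp [pvTokens],
            ih [] _ _ hrec,
            show pvTokens tok (')' :: h')
              = (if tok = [] then [] else [tok]) ++ pvTokens [] h' from by simp [pvTokens]]
        simp
      · rw [show pvTokens tok (c :: cs) = pvTokens (tok ++ [c]) cs from by
              simp [pvTokens, hc, hc2],
            ih (tok ++ [c]) _ _ hrec,
            show pvTokens tok (c :: h') = pvTokens (tok ++ [c]) h' from by
              simp [pvTokens, hc, hc2]]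

-- (4) pvTokens of a '('-free field is the nonempty filter of its ')'-split
lemma pv_tokens_Q : ∀ (k tok : List Char),
    (∀ a ∈ k, a ≠ '(') → (∀ a ∈ tok, a ≠ '(' ∧ a ≠ ')') →
    pvTokens tok k = (List.splitOnP (· == ')') (tok ++ k)).filter (· != []) := by
  intro k
  induction k with
  | nil =>
    intro tok hk htok
    rw [List.append_nil, List.splitOnP_eq_single _ _ (by
      intro a ha; simp [(htok a ha).2])]
    by_cases h : tok = [] <;> simp [pvTokens, h]
  | cons c cs ih =>
    intro tok hk htok
    by_cases hc : c = ')'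
    · subst hc
      rw [show pvTokens tok (')' :: cs)
            = (if tok = [] then [] else [tok]) ++ pvTokens [] cs from by simp [pvTokens],
          ih [] (fun a ha => hk a (by simp [ha])) (by simp),
          List.splitOnP_first _ tok (by intro a ha; simp [(htok a ha).2]) ')' (by simp) cs]
      by_cases h : tok = [] <;> simp [h]
    · have hc1 : c ≠ '(' := hk c (by simp)
      rw [show pvTokens tok (c :: cs) = pvTokens (tok ++ [c]) cs from by
            simp [pvTokens, hc1, hc],
          ih (tok ++ [c]) (fun a ha => hk a (by simp [ha])) (by
            intro a ha
            rcases List.mem_append.mp ha with ha | ha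
            · exact htok a ha
            · simp at ha; simp [ha, hc1, hc])]
      simp

-- (5) A's inner double loop on one field computes pvField
lemma pv_inner_eq (i : List Char) :
    (PySem.Chars.splitOn i ['(']).foldl (fun ne k =>
        if k = [] then ne
        else (PySem.Chars.splitOn k [')']).foldl
               (fun ne q => if q = [] then ne else ne ++ [String.ofList q]) ne) []
      = pvField i := by
  have hstep : ∀ (k : List Char) (ne : List String),
      (PySem.Chars.splitOn k [')']).foldl
          (fun ne q => if q = [] then ne else ne ++ [String.ofList q]) ne
        = ne ++ ((List.splitOnP (· == ')') k).filter (· != [])).map String.ofList := by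
    intro k ne
    rw [pv_splitOn_bridge,
        show (fun (ne : List String) q => if q = [] then ne else ne ++ [String.ofList q])
          = (fun ne q => if (q != []) = true then ne ++ [String.ofList q] else ne) from by
          funext ne q; by_cases h : q = [] <;> simp [h],
        PySem.List.foldl_append_if]
    rfl
  -- fold over the '('-pieces appends each piece's contribution
  have hfold : ∀ (z : List (List Char)) (init : List String),
      z.foldl (fun ne k =>
          if k = [] then ne
          else (PySem.Chars.splitOn k [')']).foldl
                 (fun ne q => if q = [] then ne else ne ++ [String.ofList q]) ne) init
        = init ++ z.flatMap (fun k =>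
            ((List.splitOnP (· == ')') k).filter (· != [])).map String.ofList) := by
    intro z
    induction z with
    | nil => simp
    | cons k z ihz =>
      intro init
      by_cases hk : k = []
      · subst hk
        rw [List.foldl_cons, if_pos rfl, ihz init]
        simp [List.splitOnP_nil]
      · rw [List.foldl_cons, if_neg hk, hstep k init, ihz]
        simp [List.flatMap_cons, List.append_assoc]
  rw [pv_splitOn_bridge, hfold]
  rcases hz : List.splitOnP (· == '(') i with _ | ⟨h, t⟩
  · exact absurd hz (List.splitOnP_ne_nil _ _)
  have hpiece : ∀ k ∈ h :: t, (List.splitOnP (· == ')') k).filter (· != [])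
      = pvTokens [] k := by
    intro k hkmem
    have hq := pv_tokens_Q k [] (by
      intro a ha
      have := pv_splitOnP_pieces (· == '(') i k (by rw [hz]; exact hkmem) a ha
      simpa using this) (by simp)
    simpa using hq.symm
  calc (List.splitOn '(' i).flatMap (fun k =>
          ((List.splitOnP (· == ')') k).filter (· != [])).map String.ofList)
      = (h :: t).flatMap (fun k => (pvTokens [] k).map String.ofList) := by
        show (List.splitOnP (· == '(') i).flatMap _ = _
        rw [hz]
        exact List.flatMap_congr (fun k hkmem => by rw [hpiece k hkmem])
    _ = (pvTokens [] h ++ t.flatMap (pvTokens [])).map String.ofList := by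
        simp [List.map_flatMap]
    _ = pvField i := by rw [pvField, ← pv_tokens_P i [] h t hz]

-- (6) B's loop invariant, against the ','-split of the remaining input
lemma pv_altLoop_spec : ∀ (cs : List Char) (ents : List (List String)) (group : List String)
    (tok : List Char) (seen : Bool),
    (∀ a ∈ tok, a ≠ ',' ∧ a ≠ '(' ∧ a ≠ ')') → (tok ≠ [] → seen = true) →
    ∀ (f0 : List Char) (rest : List (List Char)), List.splitOn ',' cs = f0 :: rest →
    figure_split_machine_altLoop cs ents group tok seen
      = ents ++ (if seen = true ∨ f0 ≠ [] then [group ++ (pvTokens tok f0).map String.ofList] else [])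
             ++ (rest.filter (· != [])).map pvField := by
  intro cs
  induction cs with
  | nil =>
    intro ents group tok seen htok hseen f0 rest hsplit
    rw [List.splitOn, List.splitOnP_nil] at hsplit
    cases hsplit
    show (if seen then ents ++ [if tok = [] then group else group ++ [String.ofList tok]] else ents) = _
    cases seen with
    | false =>
      have ht : tok = [] := by
        by_contra hh
        simpa using hseen hh
      subst ht
      simp
    | true => by_cases h : tok = [] <;> simp [h, pvTokens]
  | cons ch cs ih =>
    intro ents group tok seen htok hseen f0 rest hsplit
    rw [List.splitOn, List.splitOnP_cons] at hsplit
    rcases hrec : List.splitOnP (· == ',') cs with _ | ⟨f0', rest'⟩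
    · exact absurd hrec (List.splitOnP_ne_nil _ _)
    by_cases hcomma : ch = ','
    · rw [if_pos (by simp [hcomma]), hrec] at hsplit
      cases hsplit
      rw [show figure_split_machine_altLoop (ch :: cs) ents group tok seen
            = figure_split_machine_altLoop cs
                (if seen then ents ++ [if tok = [] then group else group ++ [String.ofList tok]] else ents)
                [] [] false from by simp [figure_split_machine_altLoop, hcomma],
          ih _ [] [] false (by simp) (by simp) f0' rest' hrec]
      cases seen with
      | false =>
        have ht : tok = [] := by
          by_contra h; exact absurd (hseen h) (by simp)
        subst ht
        by_cases h0 : f0' = [] <;> simp [h0, pvField]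
      | true =>
        by_cases ht : tok = [] <;> by_cases h0 : f0' = [] <;>
          simp [ht, h0, pvTokens, pvField]
    · rw [if_neg (by simp [hcomma]), hrec, List.modifyHead_cons] at hsplit
      cases hsplit
      by_cases hdelim : ch = '(' ∨ ch = ')'
      · rw [show figure_split_machine_altLoop (ch :: cs) ents group tok seen
              = figure_split_machine_altLoop cs ents
                  (if tok = [] then group else group ++ [String.ofList tok]) [] true from by
                simp [figure_split_machine_altLoop, hcomma, hdelim],
            ih _ _ [] true (by simp) (by simp) f0' _ hrec,
            show pvTokens tok (ch :: f0')
              = (if tok = [] then [] else [tok]) ++ pvTokens [] f0' from by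
                simp [pvTokens, hdelim]]
        by_cases ht : tok = [] <;> simp [ht]
      · rw [show figure_split_machine_altLoop (ch :: cs) ents group tok seen
              = figure_split_machine_altLoop cs ents group (tok ++ [ch]) true from by
                simp only [figure_split_machine_altLoop, if_neg hcomma, if_neg hdelim],
            ih _ _ (tok ++ [ch]) true (by
              intro a ha
              rcases List.mem_append.mp ha with ha | ha
              · exact htok a ha
              · simp at ha
                subst ha
                exact ⟨hcomma, fun h => hdelim (Or.inl h), fun h => hdelim (Or.inr h)⟩)
              (by simp) f0' _ hrec,
            show pvTokens tok (ch :: f0') = pvTokens (tok ++ [ch]) f0' from by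
              simp [pvTokens, hdelim]]
        simp

-- ===== VERDICT (by name: the statement is the Claim_ definition above) =====
theorem figure_split_machine_spec : Claim_equal_figure_split_machine := by
  intro _str _hdom _hpre
  unfold Spec_figure_split_machine
  match _str with
  | none => rfl
  | some s =>
    show (if s = "None" ∨ s = "none" then [] else _)
       = (if s = "None" ∨ s = "none" then [] else _)
    by_cases hg : s = "None" ∨ s = "none"
    · rw [if_pos hg, if_pos hg]
    · rw [if_neg hg, if_neg hg]
      rcases hz : List.splitOn ',' s.toList with _ | ⟨f0, rest⟩
      · exact absurd hz (List.splitOnP_ne_nil _ _)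
      rw [pv_altLoop_spec s.toList [] [] [] false (by simp) (by simp) f0 rest hz]
      rw [pv_splitOn_bridge, hz]
      have hfold : ∀ (z : List (List Char)) (init : List (List String)),
          z.foldl (fun ents i => if i = [] then ents else ents ++
            [(PySem.Chars.splitOn i ['(']).foldl (fun ne k =>
               if k = [] then ne
               else (PySem.Chars.splitOn k [')']).foldl
                      (fun ne q => if q = [] then ne else ne ++ [String.ofList q]) ne) []]) init
            = init ++ (z.filter (· != [])).map pvField := by
        intro z
        induction z with
        | nil => simp
        | cons i z ihz =>
          intro init
          by_cases hi : i = []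
          · simp [hi, ihz]
          · simp only [List.foldl_cons, if_neg hi, pv_inner_eq i, ihz, List.filter_cons]
            simp [hi]
      rw [hfold]
      by_cases h0 : f0 = [] <;> simp [h0, pvField]
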